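-- pv_equiv track=rewrite | github.com/XuanShine/PyMusic | proba_music.py | n_occurrence
-- ===== SOURCE A (Python) =====
-- def n_occurrence(liste, n=1):
--     """ Return a dict with the number of occurrence of each n element in
--     the list
--     return {(a, b): {a: 3, b: 4, c: 5},
--             (b, c): {a: 1, b: 5, c: 7}, ...} """
--     dico = {}
--     for i in range(len(liste)-n):
--         tuple_note = tuple(liste[i:i+n])
--         next_note = liste[i+n]
--         if tuple_note not in dico:
--             dico[tuple_note] = {}
--         try:
--             dico[tuple_note][next_note] += 1
--         except KeyError:
--             dico[tuple_note][next_note] = 1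
--     return dico
-- ===== SOURCE B (Python) =====
-- def n_occurrence(liste, n=1):
--     # group-then-count: collect the raw successor LIST of each n-gram in one pass,
--     # then build each inner dict declaratively by dedup + list.count (no incremental tally)
--     groups = {}
--     for i in range(len(liste) - n):
--         groups.setdefault(tuple(liste[i:i+n]), []).append(liste[i+n])
--     return {t: {x: xs.count(x) for x in dict.fromkeys(xs)}
--             for t, xs in groups.items()}
-- ===== Notes on version B (the rewrite author's own statement) =====
-- stated objective: alternative
-- what changed: B never counts incrementally: one pass only groups the raw successor occurrences of each n-gram into a list, and each inner count dict is then produced declaratively by dedup + list.count over that group.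
import Mathlib
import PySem

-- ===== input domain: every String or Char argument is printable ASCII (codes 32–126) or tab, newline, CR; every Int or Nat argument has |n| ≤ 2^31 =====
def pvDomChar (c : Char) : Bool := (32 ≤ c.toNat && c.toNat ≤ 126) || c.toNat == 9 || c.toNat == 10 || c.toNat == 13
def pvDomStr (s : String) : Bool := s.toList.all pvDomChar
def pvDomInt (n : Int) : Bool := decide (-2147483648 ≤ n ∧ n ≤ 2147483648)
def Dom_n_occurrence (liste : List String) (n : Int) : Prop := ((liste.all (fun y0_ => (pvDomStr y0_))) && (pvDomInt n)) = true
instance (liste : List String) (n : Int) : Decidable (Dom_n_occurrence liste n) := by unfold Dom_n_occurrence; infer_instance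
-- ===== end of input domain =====

-- B groups each n-gram's successors into a list in one pass, then counts each group by
-- dedup + list.count (no incremental counting); objective: alternative (same-order result).

-- ===== PORT A =====
-- A's loop body: ensure dico[tuple_note] exists, then try-increment / except-set-1.
def nOccStepA (d : PySem.Dict (List String) (PySem.Dict String Int)) (t : List String) (x : String) :
    PySem.Dict (List String) (PySem.Dict String Int) :=
  let d1 := if d.contains t then d else d.insert t PySem.Dict.empty
  let inner := d1.getD t PySem.Dict.empty
  let inner' := match inner.get? x with
    | some v => inner.insert x (v + 1)   -- try: dico[tuple_note][next_note] += 1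
    | none   => inner.insert x 1         -- except KeyError: dico[tuple_note][next_note] = 1
  d1.insert t inner'

def n_occurrence (liste : List String) (n : Int) : List (List String × List (String × Int)) :=
  let d := (PySem.List.pyRange 0 ((liste.length : Int) - n) 1).foldl
    (fun d i =>
      match PySem.List.pyGet? liste (i + n) with
      | none   => d  -- IndexError in Python: excluded by Pre_n_occurrence
      | some x => nOccStepA d (PySem.List.slice liste i (i + n)) x)
    PySem.Dict.empty
  d.items.map (fun kv => (kv.1, kv.2.items))

-- ===== PORT B =====
def n_occurrence_alt (liste : List String) (n : Int) : List (List String × List (String × Int)) :=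
  -- pass 1: groups.setdefault(tuple, []).append(next)  (append to the stored list, in place)
  let groups : PySem.Dict (List String) (List String) :=
    (PySem.List.pyRange 0 ((liste.length : Int) - n) 1).foldl
      (fun g i =>
        match PySem.List.pyGet? liste (i + n) with
        | none   => g  -- IndexError in Python: excluded by Pre_n_occurrence
        | some x =>
          let t := PySem.List.slice liste i (i + n)
          g.insert t (g.getD t [] ++ [x]))
      PySem.Dict.empty
  -- pass 2: {t: {x: xs.count(x) for x in dict.fromkeys(xs)} for t, xs in groups.items()}
  groups.items.map (fun kv =>
    (kv.1, (PySem.List.dedup kv.2).map (fun x => (x, (kv.2.count x : Int)))))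

-- ===== PRECONDITION & SPEC =====
-- Pre_ admits exactly the inputs on which Python A returns: for n < -len(liste) the first
-- iteration evaluates liste[n] and raises IndexError.
def Pre_n_occurrence (liste : List String) (n : Int) : Prop := -(liste.length : Int) ≤ n
instance (liste : List String) (n : Int) : Decidable (Pre_n_occurrence liste n) := by
  unfold Pre_n_occurrence; infer_instance

def pvWitness_n_occurrence : List String × Int := (["a", "b", "a", "b"], 1)

def Spec_n_occurrence (liste : List String) (n : Int) (out : List (List String × List (String × Int))) : Prop :=
  out = n_occurrence_alt liste n
instance (liste : List String) (n : Int) (out : List (List String × List (String × Int))) :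
    Decidable (Spec_n_occurrence liste n out) := by unfold Spec_n_occurrence; infer_instance

-- ===== CLAIM (what is proved, stated in full; the proofs are below) =====
def Claim_equal_n_occurrence : Prop := ∀ (liste : List String) (n : Int),
  Dom_n_occurrence liste n → Pre_n_occurrence liste n →
  Spec_n_occurrence liste n (n_occurrence liste n)

-- ===== LEMMAS AND PROOFS =====

-- generic: a fold that skips `none` items is a fold over the filterMap
theorem pvFoldlSkipNone {α β σ : Type} (f : α → Option β) (step : σ → β → σ) :
    ∀ (l : List α) (init : σ),
      l.foldl (fun d i => match f i with | none => d | some x => step d x) init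
        = (l.filterMap f).foldl step init := by
  intro l
  induction l with
  | nil => intro init; rfl
  | cons a l ih =>
    intro init
    cases h : f a <;> simp [h, ih]

-- the transition pairs both ports traverse
def pvPairs (liste : List String) (n : Int) : List (List String × String) :=
  (PySem.List.pyRange 0 ((liste.length : Int) - n) 1).filterMap
    (fun i => (PySem.List.pyGet? liste (i + n)).map (fun x => (PySem.List.slice liste i (i + n), x)))

-- A's step in closed form
def pvStepA (d : PySem.Dict (List String) (PySem.Dict String Int)) (p : List String × String) :
    PySem.Dict (List String) (PySem.Dict String Int) :=
  d.insert p.1 ((d.getD p.1 PySem.Dict.empty).insert p.2 ((d.getD p.1 PySem.Dict.empty).getD p.2 0 + 1))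

-- B's grouping step in closed form
def pvStepG (d : PySem.Dict (List String) (List String)) (p : List String × String) :
    PySem.Dict (List String) (List String) :=
  d.insert p.1 (d.getD p.1 [] ++ [p.2])

theorem pvStepA_eq (d : PySem.Dict (List String) (PySem.Dict String Int)) (t : List String) (x : String) :
    nOccStepA d t x = pvStepA d (t, x) := by
  unfold nOccStepA pvStepA
  by_cases hc : d.contains t = true
  · simp only [hc, if_true]
    cases h : (d.getD t PySem.Dict.empty).get? x with
    | none => rw [PySem.Dict.getD_of_get?_eq_none _ 0 h]; simp
    | some v => rw [PySem.Dict.getD_of_get?_eq_some _ 0 h]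
  · have hc' : d.contains t = false := by simpa using hc
    simp only [hc', Bool.false_eq_true, if_false]
    rw [PySem.Dict.getD_of_not_contains _ PySem.Dict.empty hc']
    rw [PySem.Dict.getD_insert_self, PySem.Dict.insert_insert_self]
    simp [PySem.Dict.get?_empty, PySem.Dict.getD_empty]

-- A-side dict: value at a key is the counting fold over the matching transitions
theorem pvGetD_foldA (ps : List (List String × String)) :
    ∀ (d : PySem.Dict (List String) (PySem.Dict String Int)) (t : List String),
      (ps.foldl pvStepA d).getD t PySem.Dict.empty
        = ((ps.filter (fun p => p.1 == t)).map (·.2)).foldl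
            (fun inner x => inner.insert x (inner.getD x 0 + 1)) (d.getD t PySem.Dict.empty) := by
  induction ps with
  | nil => intro d t; rfl
  | cons p ps ih =>
    intro d t
    by_cases h : p.1 = t
    · subst h
      simp only [List.foldl_cons, List.filter_cons, beq_self_eq_true, if_true, List.map_cons, ih]
      rw [show (pvStepA d p).getD p.1 PySem.Dict.empty
            = (d.getD p.1 PySem.Dict.empty).insert p.2 ((d.getD p.1 PySem.Dict.empty).getD p.2 0 + 1) from
          PySem.Dict.getD_insert_self _ _ _ _]
    · have hb : (p.1 == t) = false := by simpa using h
      simp only [List.foldl_cons, List.filter_cons, hb, Bool.false_eq_true, if_false, ih]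
      rw [show (pvStepA d p).getD t PySem.Dict.empty = d.getD t PySem.Dict.empty from
          PySem.Dict.getD_insert_of_ne _ _ _ (Ne.symm h)]

-- B-side groups dict: value at a key is the successor list of the matching transitions
theorem pvGetD_foldG (ps : List (List String × String)) :
    ∀ (d : PySem.Dict (List String) (List String)) (t : List String),
      (ps.foldl pvStepG d).getD t []
        = d.getD t [] ++ (ps.filter (fun p => p.1 == t)).map (·.2) := by
  induction ps with
  | nil => intro d t; simp
  | cons p ps ih =>
    intro d t
    by_cases h : p.1 = t
    · subst h
      simp only [List.foldl_cons, List.filter_cons, beq_self_eq_true, if_true, List.map_cons, ih]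
      rw [show (pvStepG d p).getD p.1 [] = d.getD p.1 [] ++ [p.2] from
          PySem.Dict.getD_insert_self _ _ _ _]
      simp
    · have hb : (p.1 == t) = false := by simpa using h
      simp only [List.foldl_cons, List.filter_cons, hb, Bool.false_eq_true, if_false, ih]
      rw [show (pvStepG d p).getD t [] = d.getD t [] from
          PySem.Dict.getD_insert_of_ne _ _ _ (Ne.symm h)]

-- main: A's fused nested-dict items equal B's grouped-then-counted items
theorem pvMain (ps : List (List String × String)) :
    (ps.foldl pvStepA PySem.Dict.empty).items.map (fun kv => (kv.1, kv.2.items))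
      = (ps.foldl pvStepG PySem.Dict.empty).items.map (fun kv =>
          (kv.1, (PySem.List.dedup kv.2).map (fun x => (x, (kv.2.count x : Int))))) := by
  have hkA : (ps.foldl pvStepA PySem.Dict.empty).keys
      = PySem.Set.ofList (ps.map (fun p => p.1)) := by
    unfold pvStepA
    rw [PySem.Dict.keys_foldl_insert_key, PySem.Dict.keys_empty, PySem.Set.update_nil_left]
  have hkG : (ps.foldl pvStepG PySem.Dict.empty).keys
      = PySem.Set.ofList (ps.map (fun p => p.1)) := by
    unfold pvStepG
    rw [PySem.Dict.keys_foldl_insert_key, PySem.Dict.keys_empty, PySem.Set.update_nil_left]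
  have hndA : (ps.foldl pvStepA PySem.Dict.empty).keys.Nodup := by
    rw [hkA]; exact PySem.Set.nodup_ofList _
  have hndG : (ps.foldl pvStepG PySem.Dict.empty).keys.Nodup := by
    rw [hkG]; exact PySem.Set.nodup_ofList _
  rw [PySem.Dict.items_eq_map_keys _ hndA PySem.Dict.empty,
      PySem.Dict.items_eq_map_keys _ hndG [], hkA, hkG, List.map_map, List.map_map]
  apply List.map_congr_left
  intro t _
  simp only [Function.comp]
  -- left inner dict at t is the counter of the successor list of t
  have hA : (ps.foldl pvStepA PySem.Dict.empty).getD t PySem.Dict.empty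
      = PySem.Dict.counter ((ps.filter (fun p => p.1 == t)).map (·.2)) := by
    rw [pvGetD_foldA, PySem.Dict.getD_empty,
        PySem.Dict.foldl_insert_getD_add_one_eq_counter]
  have hG : (ps.foldl pvStepG PySem.Dict.empty).getD t []
      = (ps.filter (fun p => p.1 == t)).map (·.2) := by
    rw [pvGetD_foldG, PySem.Dict.getD_empty, List.nil_append]
  rw [hA, hG, PySem.Dict.items_counter]
  simp [PySem.List.dedup_eq_ofList]

-- ===== VERDICT (by name: the statement is the Claim_ definition above) =====
theorem n_occurrence_spec : Claim_equal_n_occurrence := by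
  intro liste n _ _
  unfold Spec_n_occurrence n_occurrence n_occurrence_alt
  have hA : (PySem.List.pyRange 0 ((liste.length : Int) - n) 1).foldl
      (fun d i =>
        match PySem.List.pyGet? liste (i + n) with
        | none   => d
        | some x => nOccStepA d (PySem.List.slice liste i (i + n)) x)
      PySem.Dict.empty
      = (pvPairs liste n).foldl pvStepA PySem.Dict.empty := by
    unfold pvPairs
    rw [← pvFoldlSkipNone
      (fun i => (PySem.List.pyGet? liste (i + n)).map (fun x => (PySem.List.slice liste i (i + n), x)))
      pvStepA]
    apply PySem.List.foldl_congr_mem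
    intro acc i _
    cases h : PySem.List.pyGet? liste (i + n) <;> simp [pvStepA_eq]
  have hG : (PySem.List.pyRange 0 ((liste.length : Int) - n) 1).foldl
      (fun g i =>
        match PySem.List.pyGet? liste (i + n) with
        | none   => g
        | some x =>
          let t := PySem.List.slice liste i (i + n)
          g.insert t (g.getD t [] ++ [x]))
      (PySem.Dict.empty : PySem.Dict (List String) (List String))
      = (pvPairs liste n).foldl pvStepG PySem.Dict.empty := by
    unfold pvPairs
    rw [← pvFoldlSkipNone
      (fun i => (PySem.List.pyGet? liste (i + n)).map (fun x => (PySem.List.slice liste i (i + n), x)))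
      pvStepG]
    apply PySem.List.foldl_congr_mem
    intro acc i _
    cases h : PySem.List.pyGet? liste (i + n) <;> simp [pvStepG]
  simp only [hA, hG]
  exact pvMain (pvPairs liste n)
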